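-- pv_equiv track=rewrite | github.com/remichartier/002_CodingPractice | 001_Python/20220108_2240_HackerrankTheBombermanGameMedium/theBombermanGame_v03.py | bombs_planted_exactly_three_seconds_ago_will_detonate
-- ===== SOURCE A (Python) =====
-- def bombs_planted_exactly_three_seconds_ago_will_detonate(t, grid):
--     # Once a bomb detonates, it's destroyed along with anything in its four neighboring cells. This means that if a bomb detonates in cell i,j, any valid cells(i +- 1,j)and(i, j+-1)are cleared. If there is a bomb in a neighboring cell, the neighboring bomb is destroyed without detonating, so there's no chain reaction.
--     # Here need to convert grid into array
--     ##################################################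
--     alt_grid = []
--     for line in grid:
--         l = list(line)
--         alt_grid.append(l)
--     grid = alt_grid
--
--     for line in range(len(grid)):
--         for col in range(len(grid[line])):
--             if grid[line][col] == 'B':
--                 grid[line][col] = '.'
--                 # destroy all bombs around except if exploding at that time as well
--                 # ie except if 'B'
--                 if col - 1 >= 0:
--                     if grid[line][col - 1] != 'B':
--                         grid[line][col - 1] = '.'
--                 if col + 1 < len(grid[line]):
--                     if grid[line][col + 1] != 'B':
--                         grid[line][col + 1] = '.'
--                 if line - 1 >= 0:
--                     if grid[line - 1][col] != 'B':
--                         grid[line - 1][col] = '.'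
--                 if line + 1 < len(grid):
--                     if grid[line + 1][col] != 'B':
--                         grid[line + 1][col] = '.'
--     # Here need to convert back array into array of strings !!!!!
--     ##############################################################
--     alt_grid = []
--     for l in grid:
--         s = ''.join(l)
--         alt_grid.append(s)
--     grid = alt_grid
--
--     alt_grid = []
--     for s in grid:
--         s = s.replace('O','B')
--         alt_grid.append(s)
--     return alt_grid
-- ===== SOURCE B (Python) =====
-- def bombs_planted_exactly_three_seconds_ago_will_detonate(t, grid):
--     # Gather-from-neighbors over a read-only snapshot instead of A's
--     # scatter-to-neighbors in-place mutation; never raises on ragged grids.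
--     rows = [list(r) for r in grid]
--
--     def bomb_at(i, j):
--         return 0 <= i < len(rows) and 0 <= j < len(rows[i]) and rows[i][j] == 'B'
--
--     out = []
--     for i, row in enumerate(rows):
--         chars = ['.' if (bomb_at(i, j) or bomb_at(i, j - 1) or bomb_at(i, j + 1)
--                          or bomb_at(i - 1, j) or bomb_at(i + 1, j))
--                  else c
--                  for j, c in enumerate(row)]
--         out.append(''.join(chars).replace('O', 'B'))
--     return out
-- ===== Notes on version B (the rewrite author's own statement) =====
-- stated objective: simpler
-- what changed: Replaced A's in-place scatter sweep (each bomb mutates its four neighbors in the shared grid while the scan is running) by a pure gather pass that builds each output cell from the read-only original grid: a cell becomes '.' iff it or an in-bounds 4-neighbor holds 'B'; the final 'O'->'B' replace is kept; B also returns (with per-row bounds) on the ragged grids outside Pre_ where A raises IndexError.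
import Mathlib
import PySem

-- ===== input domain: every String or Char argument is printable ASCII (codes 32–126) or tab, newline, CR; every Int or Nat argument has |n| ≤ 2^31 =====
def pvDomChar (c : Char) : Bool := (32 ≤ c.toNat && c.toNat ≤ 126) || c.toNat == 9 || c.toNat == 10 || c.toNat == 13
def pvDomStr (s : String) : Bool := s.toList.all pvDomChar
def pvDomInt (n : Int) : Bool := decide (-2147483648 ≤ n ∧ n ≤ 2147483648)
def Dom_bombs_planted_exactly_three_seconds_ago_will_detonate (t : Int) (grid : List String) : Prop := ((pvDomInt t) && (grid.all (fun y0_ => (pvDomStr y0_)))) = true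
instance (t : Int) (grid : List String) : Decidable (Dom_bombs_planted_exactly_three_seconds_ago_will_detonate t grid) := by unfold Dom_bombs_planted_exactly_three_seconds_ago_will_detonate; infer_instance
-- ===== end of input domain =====

-- B replaces A's in-place scatter sweep (each bomb mutates its neighbors in the shared grid
-- mid-scan) by a pure gather pass reading only the original grid; equal wherever A returns.

-- ===== PORT A =====
-- grid[i][j] = '.'  (writes only '.'; A's only write value apart from the initial list build)
def pvSet2 (g : List (List Char)) (i j : Nat) : List (List Char) :=
  g.set i ((g.getD i []).set j '.')

-- the guarded neighbor clear: read grid[i][j] (IndexError -> none), write '.' unless it is 'B'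
def pvClear? (g : List (List Char)) (i j : Nat) : Option (List (List Char)) :=
  (PySem.List.pyGet? (g.getD i []) (Int.ofNat j)).map
    (fun c => if c = 'B' then g else pvSet2 g i j)

-- the body of A's inner loop for one cell (line, col)
def pvCellA (g : List (List Char)) (line col : Nat) : Option (List (List Char)) :=
  if (g.getD line []).getD col ' ' = 'B' then
    (if 1 ≤ col then pvClear? (pvSet2 g line col) line (col - 1)
     else some (pvSet2 g line col)).bind fun g1 =>
    (if col + 1 < (g1.getD line []).length then pvClear? g1 line (col + 1) else some g1).bind fun g2 =>
    (if 1 ≤ line then pvClear? g2 (line - 1) col else some g2).bind fun g3 =>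
    (if line + 1 < g3.length then pvClear? g3 (line + 1) col else some g3)
  else some g

def pvRowA (g : List (List Char)) (line : Nat) : Option (List (List Char)) :=
  (List.range (g.getD line []).length).foldlM (fun h col => pvCellA h line col) g

def pvGridA (g : List (List Char)) : Option (List (List Char)) :=
  (List.range g.length).foldlM pvRowA g

def bombs_planted_exactly_three_seconds_ago_will_detonate (t : Int) (grid : List String) : List String :=
  let g := grid.map (fun s => s.toList)
  match pvGridA g with
  | none => []   -- IndexError in Python: outside Pre_, nothing is claimed here
  | some g' => (g'.map (fun l => String.mk l)).map (fun s => PySem.Str.replace s "O" "B")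

-- ===== PORT B =====
-- bomb_at(i, j) of Source B: in-bounds (per-row lengths) and the ORIGINAL cell is 'B'
def pvBombAt (rows : List (List Char)) (i j : Int) : Bool :=
  decide (0 ≤ i) && decide (i < (rows.length : Int)) && decide (0 ≤ j) &&
    decide (j < ((rows.getD i.toNat []).length : Int)) &&
    ((rows.getD i.toNat []).getD j.toNat ' ' == 'B')

def bombs_planted_exactly_three_seconds_ago_will_detonate_alt (t : Int) (grid : List String) : List String :=
  let rows := grid.map (fun s => s.toList)
  (PySem.List.enumerate rows 0).map (fun p =>
    PySem.Str.replace
      (String.mk ((PySem.List.enumerate p.2 0).map (fun q =>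
        if pvBombAt rows p.1 q.1 || pvBombAt rows p.1 (q.1 - 1) || pvBombAt rows p.1 (q.1 + 1)
            || pvBombAt rows (p.1 - 1) q.1 || pvBombAt rows (p.1 + 1) q.1
        then '.' else q.2)))
      "O" "B")

-- ===== PRECONDITION & SPEC =====
-- Pre_: every 'B' at (i,j) has j inside the row above and the row below (when those rows
-- exist); exactly the inputs on which A's vertical neighbor reads do not raise IndexError.
def Pre_bombs_planted_exactly_three_seconds_ago_will_detonate (t : Int) (grid : List String) : Prop :=
  ∀ i, i < grid.length → ∀ j, j < (grid.getD i "").toList.length →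
    (grid.getD i "").toList.getD j ' ' = 'B' →
    (1 ≤ i → j < (grid.getD (i - 1) "").toList.length) ∧
    (i + 1 < grid.length → j < (grid.getD (i + 1) "").toList.length)

instance (t : Int) (grid : List String) : Decidable (Pre_bombs_planted_exactly_three_seconds_ago_will_detonate t grid) := by
  unfold Pre_bombs_planted_exactly_three_seconds_ago_will_detonate; infer_instance

def pvWitness_bombs_planted_exactly_three_seconds_ago_will_detonate : Int × List String :=
  (0, ["B.O", "..."])

def Spec_bombs_planted_exactly_three_seconds_ago_will_detonate (t : Int) (grid : List String) (out : List String) : Prop := out = bombs_planted_exactly_three_seconds_ago_will_detonate_alt t grid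
instance (t : Int) (grid : List String) (out : List String) : Decidable (Spec_bombs_planted_exactly_three_seconds_ago_will_detonate t grid out) := by unfold Spec_bombs_planted_exactly_three_seconds_ago_will_detonate; infer_instance

-- ===== CLAIM (what is proved, stated in full; the proofs are below) =====
def Claim_equal_bombs_planted_exactly_three_seconds_ago_will_detonate : Prop := ∀ (t : Int) (grid : List String), Dom_bombs_planted_exactly_three_seconds_ago_will_detonate t grid → Pre_bombs_planted_exactly_three_seconds_ago_will_detonate t grid → Spec_bombs_planted_exactly_three_seconds_ago_will_detonate t grid (bombs_planted_exactly_three_seconds_ago_will_detonate t grid)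

-- ===== LEMMAS AND PROOFS =====

-- the original cell holds 'B'
def bAt (g : List (List Char)) (p q : Nat) : Bool := (g.getD p []).getD q ' ' == 'B'

-- (p,q) strictly before (i,j) in row-major order
def lt2 (p q i j : Nat) : Bool := decide (p < i ∨ (p = i ∧ q < j))

-- cell (p,q) has been turned to '.' after the sweep has processed all cells before (i,j)
def clearedBy (g : List (List Char)) (i j p q : Nat) : Bool :=
  (bAt g p q && lt2 p q i j) ||
  (!bAt g p q &&
    ((decide (1 ≤ q) && (bAt g p (q - 1) && lt2 p (q - 1) i j)) ||
     (bAt g p (q + 1) && lt2 p (q + 1) i j) ||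
     (decide (1 ≤ p) && (bAt g (p - 1) q && lt2 (p - 1) q i j)) ||
     (bAt g (p + 1) q && lt2 (p + 1) q i j)))

-- final per-cell condition: the cell or an in-bounds 4-neighbor is 'B' in the original grid
def boomB (g : List (List Char)) (p q : Nat) : Bool :=
  bAt g p q || (decide (1 ≤ q) && bAt g p (q - 1)) || bAt g p (q + 1) ||
    (decide (1 ≤ p) && bAt g (p - 1) q) || bAt g (p + 1) q

def PreL (g : List (List Char)) : Prop :=
  ∀ p q, p < g.length → q < (g.getD p []).length → bAt g p q = true →
    (1 ≤ p → q < (g.getD (p - 1) []).length) ∧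
    (p + 1 < g.length → q < (g.getD (p + 1) []).length)

def LenOk (g0 h : List (List Char)) : Prop :=
  h.length = g0.length ∧ ∀ p, (h.getD p []).length = (g0.getD p []).length

def CellFun (g0 h : List (List Char)) (f : Nat → Nat → Char) : Prop :=
  ∀ p q, p < g0.length → q < (g0.getD p []).length → (h.getD p []).getD q ' ' = f p q

def InvA (g0 h : List (List Char)) (i j : Nat) : Prop :=
  LenOk g0 h ∧
  CellFun g0 h (fun p q => if clearedBy g0 i j p q then '.' else (g0.getD p []).getD q ' ')

lemma bAt_lt {g : List (List Char)} {p q : Nat} (h : bAt g p q = true) :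
    p < g.length ∧ q < (g.getD p []).length := by
  unfold bAt at h
  rw [beq_iff_eq] at h
  constructor
  · by_contra hc
    push_neg at hc
    rw [List.getD_eq_default _ _ hc] at h
    simp at h
  · by_contra hc
    push_neg at hc
    rw [List.getD_eq_default _ _ hc] at h
    simp at h

lemma getD_map_toList (grid : List String) (i : Nat) :
    (grid.map (fun s => s.toList)).getD i [] = (grid.getD i "").toList := by
  rcases h : grid[i]? with _ | s
  · simp [List.getD, h]
  · simp [List.getD, h]

lemma lt2_succ_ne {a b i j : Nat} (h : ¬(a = i ∧ b = j)) : lt2 a b i (j + 1) = lt2 a b i j := by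
  unfold lt2
  rw [decide_eq_decide]
  omega

lemma lt2_row_end {a b i R : Nat} (h : a = i → b < R) : lt2 a b i R = lt2 a b (i + 1) 0 := by
  unfold lt2
  rw [decide_eq_decide]
  omega

lemma pair_row_end (g : List (List Char)) (a b i R : Nat)
    (h : bAt g a b = true → a = i → b < R) :
    (bAt g a b && lt2 a b i R) = (bAt g a b && lt2 a b (i + 1) 0) := by
  cases hB : bAt g a b with
  | false => simp
  | true => rw [lt2_row_end (h hB)]

lemma pair_all (g : List (List Char)) (a b n : Nat) (h : bAt g a b = true → a < n) :
    (bAt g a b && lt2 a b n 0) = bAt g a b := by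
  cases hB : bAt g a b with
  | false => simp
  | true =>
    have := h hB
    unfold lt2
    simp
    omega

-- length facts
lemma len_set2 (g : List (List Char)) (a b : Nat) : (pvSet2 g a b).length = g.length := by
  simp [pvSet2]

lemma rowlen_set2 (g : List (List Char)) (a b p : Nat) :
    ((pvSet2 g a b).getD p []).length = ((g.getD p []) : List Char).length := by
  unfold pvSet2
  rcases eq_or_ne a p with rfl | hne
  · rw [List.getD_eq_getElem?_getD (l := g.set a ((g.getD a []).set b '.')) (i := a),
      List.getElem?_set, if_pos rfl]
    by_cases h : a < g.length
    · rw [if_pos h]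
      simp
    · rw [if_neg h]
      rw [List.getD_eq_default _ _ (by omega)]
      rfl
  · rw [List.getD_eq_getElem?_getD (l := g.set a ((g.getD a []).set b '.')) (i := p),
      List.getElem?_set, if_neg hne, ← List.getD_eq_getElem?_getD]

lemma cell_set2 (g : List (List Char)) (a b p q : Nat)
    (ha : a < g.length) (hb : b < (g.getD a []).length) :
    ((pvSet2 g a b).getD p []).getD q ' ' =
      if p = a ∧ q = b then '.' else (g.getD p []).getD q ' ' := by
  unfold pvSet2
  rcases eq_or_ne a p with rfl | hne
  · rw [List.getD_eq_getElem?_getD (l := g.set a ((g.getD a []).set b '.')) (i := a),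
      List.getElem?_set, if_pos rfl, if_pos ha]
    simp only [Option.getD_some]
    rcases eq_or_ne b q with rfl | hq
    · rw [List.getD_eq_getElem?_getD (l := (g.getD a []).set b '.') (i := b),
        List.getElem?_set, if_pos rfl, if_pos hb, if_pos (by tauto)]
      rfl
    · rw [List.getD_eq_getElem?_getD (l := (g.getD a []).set b '.') (i := q),
        List.getElem?_set, if_neg hq, ← List.getD_eq_getElem?_getD,
        if_neg (by tauto)]
  · rw [List.getD_eq_getElem?_getD (l := g.set a ((g.getD a []).set b '.')) (i := p),
      List.getElem?_set, if_neg hne, ← List.getD_eq_getElem?_getD,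
      if_neg (by tauto)]

lemma lenok_set2 {g0 h : List (List Char)} (hL : LenOk g0 h) (a b : Nat) :
    LenOk g0 (pvSet2 h a b) := by
  obtain ⟨h1, h2⟩ := hL
  exact ⟨by rw [len_set2, h1], fun p => by rw [rowlen_set2, h2]⟩

lemma set2_spec {g0 h : List (List Char)} {f : Nat → Nat → Char}
    (hL : LenOk g0 h) (hf : CellFun g0 h f) (a b : Nat)
    (ha : a < g0.length) (hb : b < (g0.getD a []).length) :
    LenOk g0 (pvSet2 h a b) ∧
    CellFun g0 (pvSet2 h a b) (fun p q => if p = a ∧ q = b then '.' else f p q) := by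
  refine ⟨lenok_set2 hL a b, fun p q hp hq => ?_⟩
  show ((pvSet2 h a b).getD p []).getD q ' ' = if p = a ∧ q = b then '.' else f p q
  rw [cell_set2 h a b p q (by rw [hL.1]; exact ha) (by rw [hL.2]; exact hb)]
  split_ifs with hc
  · rfl
  · exact hf p q hp hq

lemma clear?_spec {g0 h : List (List Char)} {f : Nat → Nat → Char}
    (hL : LenOk g0 h) (hf : CellFun g0 h f) (a b : Nat)
    (ha : a < g0.length) (hb : b < (g0.getD a []).length) :
    ∃ h', pvClear? h a b = some h' ∧ LenOk g0 h' ∧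
      CellFun g0 h'
        (fun p q => if p = a ∧ q = b then (if f a b = 'B' then 'B' else '.') else f p q) := by
  have hb' : b < (h.getD a []).length := by rw [hL.2]; exact hb
  have hget : PySem.List.pyGet? (h.getD a []) (Int.ofNat b) = some ((h.getD a []).getD b ' ') := by
    rw [show (Int.ofNat b) = ((b : Nat) : Int) from rfl, PySem.List.pyGet?_natCast,
      List.getElem?_eq_getElem hb', List.getD_eq_getElem _ _ hb']
  have hval : (h.getD a []).getD b ' ' = f a b := hf a b ha hb
  unfold pvClear?
  rw [hget, Option.map_some, hval]
  split_ifs with hB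
  · refine ⟨h, rfl, hL, fun p q hp hq => ?_⟩
    show (h.getD p []).getD q ' ' = if p = a ∧ q = b then 'B' else f p q
    rw [hf p q hp hq]
    by_cases hc : p = a ∧ q = b
    · rw [if_pos hc, hc.1, hc.2]
      exact hB
    · rw [if_neg hc]
  · obtain ⟨hL', hf'⟩ := set2_spec hL hf a b ha hb
    refine ⟨pvSet2 h a b, rfl, hL', fun p q hp hq => ?_⟩
    show ((pvSet2 h a b).getD p []).getD q ' ' = if p = a ∧ q = b then '.' else f p q
    exact hf' p q hp hq

-- the bomb-detection read during the sweep sees 'B' exactly at original bombs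
lemma cur_eq_B_iff {g0 : List (List Char)} {i j : Nat}
    (hcell : (if clearedBy g0 i j i j then '.' else (g0.getD i []).getD j ' ') = 'B') :
    bAt g0 i j = true := by
  have hlt : lt2 i j i j = false := by unfold lt2; simp
  by_cases hB : bAt g0 i j = true
  · exact hB
  · exfalso
    rw [Bool.not_eq_true] at hB
    unfold clearedBy at hcell
    rw [hB, hlt] at hcell
    simp only [Bool.and_false, Bool.false_and, Bool.false_or, Bool.not_false, Bool.true_and] at hcell
    split_ifs at hcell
    · exact absurd hcell (by decide)
    · unfold bAt at hB
      rw [hcell] at hB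
      simp at hB

lemma cell_step {g0 h : List (List Char)} {i j : Nat}
    (hp : PreL g0) (hi : i < g0.length) (hj : j < (g0.getD i []).length)
    (hInv : InvA g0 h i j) :
    ∃ h', pvCellA h i j = some h' ∧ InvA g0 h' i (j + 1) := by
  obtain ⟨hL, hf⟩ := hInv
  have hcur : (h.getD i []).getD j ' ' =
      (if clearedBy g0 i j i j then '.' else (g0.getD i []).getD j ' ') := hf i j hi hj
  by_cases hB : bAt g0 i j = true
  case neg =>
    -- no bomb here: the cell read is not 'B', A does nothing
    have hBf : bAt g0 i j = false := by simpa using hB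
    have hcb : ∀ p q, clearedBy g0 i (j + 1) p q = clearedBy g0 i j p q := by
      intro p q
      unfold clearedBy
      have e1 : (bAt g0 p q && lt2 p q i (j + 1)) = (bAt g0 p q && lt2 p q i j) := by
        by_cases hc : p = i ∧ q = j
        · obtain ⟨rfl, rfl⟩ := hc; rw [hBf]; simp
        · rw [lt2_succ_ne hc]
      have e2 : (bAt g0 p (q - 1) && lt2 p (q - 1) i (j + 1)) =
          (bAt g0 p (q - 1) && lt2 p (q - 1) i j) := by
        by_cases hc : p = i ∧ q - 1 = j
        · obtain ⟨rfl, h2⟩ := hc; rw [h2, hBf]; simp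
        · rw [lt2_succ_ne hc]
      have e3 : (bAt g0 p (q + 1) && lt2 p (q + 1) i (j + 1)) =
          (bAt g0 p (q + 1) && lt2 p (q + 1) i j) := by
        by_cases hc : p = i ∧ q + 1 = j
        · obtain ⟨rfl, h2⟩ := hc; rw [h2, hBf]; simp
        · rw [lt2_succ_ne hc]
      have e4 : (bAt g0 (p - 1) q && lt2 (p - 1) q i (j + 1)) =
          (bAt g0 (p - 1) q && lt2 (p - 1) q i j) := by
        by_cases hc : p - 1 = i ∧ q = j
        · obtain ⟨h1, rfl⟩ := hc; rw [h1, hBf]; simp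
        · rw [lt2_succ_ne hc]
      have e5 : (bAt g0 (p + 1) q && lt2 (p + 1) q i (j + 1)) =
          (bAt g0 (p + 1) q && lt2 (p + 1) q i j) := by
        by_cases hc : p + 1 = i ∧ q = j
        · obtain ⟨h1, rfl⟩ := hc; rw [h1, hBf]; simp
        · rw [lt2_succ_ne hc]
      rw [e1, e2, e3, e4, e5]
    refine ⟨h, ?_, hL, fun p q hp' hq' => ?_⟩
    · unfold pvCellA
      rw [if_neg]
      intro hc
      exact hB (cur_eq_B_iff (hcur ▸ hc))
    · show (h.getD p []).getD q ' ' =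
        if clearedBy g0 i (j + 1) p q then '.' else (g0.getD p []).getD q ' '
      rw [hcb p q]
      exact hf p q hp' hq'
  case pos =>
    -- bomb at (i,j): the cell is set to '.', then the four guarded neighbor clears run
    have hlt : lt2 i j i j = false := by unfold lt2; simp
    have hone : clearedBy g0 i j i j = false := by
      unfold clearedBy; rw [hB, hlt]; simp
    have hcurB : (h.getD i []).getD j ' ' = 'B' := by
      rw [hcur, hone]
      simp only [Bool.false_eq_true, if_false]
      unfold bAt at hB; rwa [beq_iff_eq] at hB
    have hvert := hp i j hi hj hB
    have hlt_succ : lt2 i j i (j + 1) = true := by unfold lt2; simp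
    have horigB : (g0.getD i []).getD j ' ' = 'B' := by
      unfold bAt at hB; rwa [beq_iff_eq] at hB
    -- the pure picture of the state before this cell
    set f0 : Nat → Nat → Char :=
      fun p q => if clearedBy g0 i j p q then '.' else (g0.getD p []).getD q ' ' with hf0
    -- step 1: grid[i][j] := '.'
    obtain ⟨hL1, hF1⟩ := set2_spec hL hf i j hi hj
    set f1 : Nat → Nat → Char := fun p q => if p = i ∧ q = j then '.' else f0 p q with hf1def
    -- step 2: left neighbor
    have step2 : ∃ h2, (if 1 ≤ j then pvClear? (pvSet2 h i j) i (j - 1)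
        else some (pvSet2 h i j)) = some h2 ∧
        LenOk g0 h2 ∧ CellFun g0 h2 (fun p q =>
          if 1 ≤ j ∧ p = i ∧ q = j - 1 then (if f1 i (j - 1) = 'B' then 'B' else '.')
          else f1 p q) := by
      by_cases hg : 1 ≤ j
      · rw [if_pos hg]
        obtain ⟨h2, e2, hL2, hF2⟩ := clear?_spec hL1 hF1 i (j - 1) hi (by omega)
        refine ⟨h2, e2, hL2, fun p q hp' hq' => ?_⟩
        show (h2.getD p []).getD q ' ' =
          if 1 ≤ j ∧ p = i ∧ q = j - 1 then (if f1 i (j - 1) = 'B' then 'B' else '.')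
          else f1 p q
        rw [show (h2.getD p []).getD q ' ' =
          if p = i ∧ q = j - 1 then (if f1 i (j - 1) = 'B' then 'B' else '.') else f1 p q
          from hF2 p q hp' hq']
        by_cases c : p = i ∧ q = j - 1
        · rw [if_pos c, if_pos (show 1 ≤ j ∧ p = i ∧ q = j - 1 from ⟨hg, c.1, c.2⟩)]
        · rw [if_neg c, if_neg (show ¬(1 ≤ j ∧ p = i ∧ q = j - 1) from fun hc => c hc.2)]
      · rw [if_neg hg]
        refine ⟨pvSet2 h i j, rfl, hL1, fun p q hp' hq' => ?_⟩
        show ((pvSet2 h i j).getD p []).getD q ' ' =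
          if 1 ≤ j ∧ p = i ∧ q = j - 1 then (if f1 i (j - 1) = 'B' then 'B' else '.')
          else f1 p q
        rw [if_neg (show ¬(1 ≤ j ∧ p = i ∧ q = j - 1) from fun hc => hg hc.1)]
        exact hF1 p q hp' hq'
    obtain ⟨h2, e2, hL2, hF2⟩ := step2
    set f2 : Nat → Nat → Char := fun p q =>
      if 1 ≤ j ∧ p = i ∧ q = j - 1 then (if f1 i (j - 1) = 'B' then 'B' else '.')
      else f1 p q with hf2def
    -- step 3: right neighbor (guard reads the current row length = the original one)
    have hglen : (h2.getD i []).length = (g0.getD i []).length := hL2.2 i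
    have step3 : ∃ h3, (if j + 1 < (h2.getD i []).length then pvClear? h2 i (j + 1)
        else some h2) = some h3 ∧
        LenOk g0 h3 ∧ CellFun g0 h3 (fun p q =>
          if p = i ∧ q = j + 1 then (if f2 i (j + 1) = 'B' then 'B' else '.')
          else f2 p q) := by
      by_cases hg : j + 1 < (g0.getD i []).length
      · rw [hglen, if_pos hg]
        exact clear?_spec hL2 hF2 i (j + 1) hi hg
      · rw [hglen, if_neg hg]
        refine ⟨h2, rfl, hL2, fun p q hp' hq' => ?_⟩
        show (h2.getD p []).getD q ' ' =
          if p = i ∧ q = j + 1 then (if f2 i (j + 1) = 'B' then 'B' else '.') else f2 p q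
        rw [if_neg (show ¬(p = i ∧ q = j + 1) from fun hc =>
          hg (by rw [← hc.1, ← hc.2]; exact hq'))]
        exact hF2 p q hp' hq'
    obtain ⟨h3, e3, hL3, hF3⟩ := step3
    set f3 : Nat → Nat → Char := fun p q =>
      if p = i ∧ q = j + 1 then (if f2 i (j + 1) = 'B' then 'B' else '.')
      else f2 p q with hf3def
    -- step 4: up neighbor (in range by Pre_)
    have step4 : ∃ h4, (if 1 ≤ i then pvClear? h3 (i - 1) j else some h3) = some h4 ∧
        LenOk g0 h4 ∧ CellFun g0 h4 (fun p q =>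
          if 1 ≤ i ∧ p = i - 1 ∧ q = j then (if f3 (i - 1) j = 'B' then 'B' else '.')
          else f3 p q) := by
      by_cases hg : 1 ≤ i
      · rw [if_pos hg]
        obtain ⟨h4, e4, hL4, hF4⟩ := clear?_spec hL3 hF3 (i - 1) j (by omega) (hvert.1 hg)
        refine ⟨h4, e4, hL4, fun p q hp' hq' => ?_⟩
        show (h4.getD p []).getD q ' ' =
          if 1 ≤ i ∧ p = i - 1 ∧ q = j then (if f3 (i - 1) j = 'B' then 'B' else '.')
          else f3 p q
        rw [show (h4.getD p []).getD q ' ' =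
          if p = i - 1 ∧ q = j then (if f3 (i - 1) j = 'B' then 'B' else '.') else f3 p q
          from hF4 p q hp' hq']
        by_cases c : p = i - 1 ∧ q = j
        · rw [if_pos c, if_pos (show 1 ≤ i ∧ p = i - 1 ∧ q = j from ⟨hg, c.1, c.2⟩)]
        · rw [if_neg c, if_neg (show ¬(1 ≤ i ∧ p = i - 1 ∧ q = j) from fun hc => c hc.2)]
      · rw [if_neg hg]
        refine ⟨h3, rfl, hL3, fun p q hp' hq' => ?_⟩
        show (h3.getD p []).getD q ' ' =
          if 1 ≤ i ∧ p = i - 1 ∧ q = j then (if f3 (i - 1) j = 'B' then 'B' else '.')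
          else f3 p q
        rw [if_neg (show ¬(1 ≤ i ∧ p = i - 1 ∧ q = j) from fun hc => hg hc.1)]
        exact hF3 p q hp' hq'
    obtain ⟨h4, e4, hL4, hF4⟩ := step4
    set f4 : Nat → Nat → Char := fun p q =>
      if 1 ≤ i ∧ p = i - 1 ∧ q = j then (if f3 (i - 1) j = 'B' then 'B' else '.')
      else f3 p q with hf4def
    -- step 5: down neighbor (guard reads the current grid length = the original one)
    have hglen4 : h4.length = g0.length := hL4.1
    have step5 : ∃ h5, (if i + 1 < h4.length then pvClear? h4 (i + 1) j else some h4) = some h5 ∧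
        LenOk g0 h5 ∧ CellFun g0 h5 (fun p q =>
          if p = i + 1 ∧ q = j then (if f4 (i + 1) j = 'B' then 'B' else '.')
          else f4 p q) := by
      by_cases hg : i + 1 < g0.length
      · rw [hglen4, if_pos hg]
        exact clear?_spec hL4 hF4 (i + 1) j hg (hvert.2 hg)
      · rw [hglen4, if_neg hg]
        refine ⟨h4, rfl, hL4, fun p q hp' hq' => ?_⟩
        show (h4.getD p []).getD q ' ' =
          if p = i + 1 ∧ q = j then (if f4 (i + 1) j = 'B' then 'B' else '.') else f4 p q
        rw [if_neg (show ¬(p = i + 1 ∧ q = j) from fun hc =>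
          hg (by rw [← hc.1]; exact hp'))]
        exact hF4 p q hp' hq'
    obtain ⟨h5, e5, hL5, hF5⟩ := step5
    refine ⟨h5, ?_, hL5, fun p q hp' hq' => ?_⟩
    · unfold pvCellA
      rw [if_pos hcurB, e2, Option.bind_some, e3, Option.bind_some, e4, Option.bind_some, e5]
    · -- pointwise: the scattered result is the clearedBy-(i,j+1) picture
      show (h5.getD p []).getD q ' ' =
        if clearedBy g0 i (j + 1) p q then '.' else (g0.getD p []).getD q ' '
      rw [show (h5.getD p []).getD q ' ' =
        if p = i + 1 ∧ q = j then (if f4 (i + 1) j = 'B' then 'B' else '.') else f4 p q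
        from hF5 p q hp' hq']
      by_cases c5 : p = i + 1 ∧ q = j
      · -- cell just below the bomb
        rw [if_pos c5, c5.1, c5.2]
        have hv : f4 (i + 1) j = f0 (i + 1) j := by
          simp only [hf4def, hf3def, hf2def, hf1def]
          simp [show ¬(i + 1 = i - 1) from by omega, show ¬(i + 1 = i) from by omega]
        rw [hv]
        by_cases hNB : bAt g0 (i + 1) j = true
        · have horig : (g0.getD (i + 1) []).getD j ' ' = 'B' := by
            unfold bAt at hNB; rwa [beq_iff_eq] at hNB
          have hv0 : f0 (i + 1) j = 'B' := by
            simp only [hf0]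
            rw [show clearedBy g0 i j (i + 1) j = false from by
              unfold clearedBy
              rw [hNB, show lt2 (i + 1) j i j = false from by unfold lt2; simp]
              simp]
            simpa using horig
          have hcl : clearedBy g0 i (j + 1) (i + 1) j = false := by
            unfold clearedBy
            rw [hNB, show lt2 (i + 1) j i (j + 1) = false from by unfold lt2; simp]
            simp
          rw [hv0, if_pos rfl, hcl]
          simpa using horig.symm
        · have hBf : bAt g0 (i + 1) j = false := by simpa using hNB
          have horig_ne : (g0.getD (i + 1) []).getD j ' ' ≠ 'B' := by
            unfold bAt at hBf; simpa using hBf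
          have hcl : clearedBy g0 i (j + 1) (i + 1) j = true := by
            unfold clearedBy
            rw [hBf, show (i + 1) - 1 = i from by omega, hB, hlt_succ]
            simp
          rw [hcl, if_pos rfl]
          have hv0 : f0 (i + 1) j ≠ 'B' := by
            simp only [hf0]
            split_ifs
            · decide
            · exact horig_ne
          rw [if_neg hv0]
      · rw [if_neg c5]
        by_cases c4 : 1 ≤ i ∧ p = i - 1 ∧ q = j
        · -- cell just above the bomb
          simp only [hf4def]
          rw [if_pos (show 1 ≤ i ∧ p = i - 1 ∧ q = j from ⟨c4.1, c4.2.1, c4.2.2⟩),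
              c4.2.1, c4.2.2]
          have hv : f3 (i - 1) j = f0 (i - 1) j := by
            simp only [hf3def, hf2def, hf1def]
            simp [show ¬(i - 1 = i) from by omega]
          rw [hv]
          by_cases hNB : bAt g0 (i - 1) j = true
          · have hv0 : f0 (i - 1) j = '.' := by
              simp only [hf0]
              rw [show clearedBy g0 i j (i - 1) j = true from by
                unfold clearedBy
                rw [hNB, show lt2 (i - 1) j i j = true from by
                  unfold lt2; simp; try omega]
                simp]
              simp
            have hcl : clearedBy g0 i (j + 1) (i - 1) j = true := by
              unfold clearedBy
              rw [hNB, show lt2 (i - 1) j i (j + 1) = true from by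
                unfold lt2; simp; try omega]
              simp
            rw [hv0, hcl]
            simp
          · have hBf : bAt g0 (i - 1) j = false := by simpa using hNB
            have horig_ne : (g0.getD (i - 1) []).getD j ' ' ≠ 'B' := by
              unfold bAt at hBf; simpa using hBf
            have hcl : clearedBy g0 i (j + 1) (i - 1) j = true := by
              unfold clearedBy
              rw [hBf, show (i - 1) + 1 = i from by omega, hB, hlt_succ]
              simp
            rw [hcl, if_pos rfl]
            have hv0 : f0 (i - 1) j ≠ 'B' := by
              simp only [hf0]
              split_ifs
              · decide
              · exact horig_ne
            rw [if_neg hv0]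
        · rw [show f4 p q = f3 p q from by simp only [hf4def]; rw [if_neg c4]]
          by_cases c3 : p = i ∧ q = j + 1
          · -- cell just right of the bomb
            simp only [hf3def]
            rw [if_pos (show p = i ∧ q = j + 1 from c3), c3.1, c3.2]
            have hv : f2 i (j + 1) = f0 i (j + 1) := by
              simp only [hf2def, hf1def]
              simp [show ¬(j + 1 = j - 1) from by omega, show ¬(j + 1 = j) from by omega]
            rw [hv]
            by_cases hNB : bAt g0 i (j + 1) = true
            · have horig : (g0.getD i []).getD (j + 1) ' ' = 'B' := by
                unfold bAt at hNB; rwa [beq_iff_eq] at hNB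
              have hv0 : f0 i (j + 1) = 'B' := by
                simp only [hf0]
                rw [show clearedBy g0 i j i (j + 1) = false from by
                  unfold clearedBy
                  rw [hNB, show lt2 i (j + 1) i j = false from by
                    unfold lt2; simp]
                  simp]
                simpa using horig
              have hcl : clearedBy g0 i (j + 1) i (j + 1) = false := by
                unfold clearedBy
                rw [hNB, show lt2 i (j + 1) i (j + 1) = false from by
                  unfold lt2; simp]
                simp
              rw [hv0, if_pos rfl, hcl]
              simpa using horig.symm
            · have hBf : bAt g0 i (j + 1) = false := by simpa using hNB
              have horig_ne : (g0.getD i []).getD (j + 1) ' ' ≠ 'B' := by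
                unfold bAt at hBf; simpa using hBf
              have hcl : clearedBy g0 i (j + 1) i (j + 1) = true := by
                unfold clearedBy
                rw [hBf, show (j + 1) - 1 = j from by omega, hB, hlt_succ]
                simp
              rw [hcl, if_pos rfl]
              have hv0 : f0 i (j + 1) ≠ 'B' := by
                simp only [hf0]
                split_ifs
                · decide
                · exact horig_ne
              rw [if_neg hv0]
          · rw [show f3 p q = f2 p q from by simp only [hf3def]; rw [if_neg c3]]
            by_cases c2' : 1 ≤ j ∧ p = i ∧ q = j - 1
            · -- cell just left of the bomb
              simp only [hf2def]
              rw [if_pos (show 1 ≤ j ∧ p = i ∧ q = j - 1 from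
                    ⟨c2'.1, c2'.2.1, c2'.2.2⟩), c2'.2.1, c2'.2.2]
              have hv : f1 i (j - 1) = f0 i (j - 1) := by
                simp only [hf1def]
                simp [show ¬(j - 1 = j) from by omega]
              rw [hv]
              by_cases hNB : bAt g0 i (j - 1) = true
              · have hv0 : f0 i (j - 1) = '.' := by
                  simp only [hf0]
                  rw [show clearedBy g0 i j i (j - 1) = true from by
                    unfold clearedBy
                    rw [hNB, show lt2 i (j - 1) i j = true from by
                      unfold lt2; simp; try omega]
                    simp]
                  simp
                have hcl : clearedBy g0 i (j + 1) i (j - 1) = true := by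
                  unfold clearedBy
                  rw [hNB, show lt2 i (j - 1) i (j + 1) = true from by
                    unfold lt2; simp; try omega]
                  simp
                rw [hv0, hcl]
                simp
              · have hBf : bAt g0 i (j - 1) = false := by simpa using hNB
                have horig_ne : (g0.getD i []).getD (j - 1) ' ' ≠ 'B' := by
                  unfold bAt at hBf; simpa using hBf
                have hcl : clearedBy g0 i (j + 1) i (j - 1) = true := by
                  unfold clearedBy
                  rw [hBf, show (j - 1) + 1 = j from by omega, hB, hlt_succ]
                  simp
                rw [hcl, if_pos rfl]
                have hv0 : f0 i (j - 1) ≠ 'B' := by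
                  simp only [hf0]
                  split_ifs
                  · decide
                  · exact horig_ne
                rw [if_neg hv0]
            · rw [show f2 p q = f1 p q from by simp only [hf2def]; rw [if_neg c2']]
              by_cases c1 : p = i ∧ q = j
              · -- the bomb cell itself
                simp only [hf1def]
                rw [if_pos (show p = i ∧ q = j from c1), c1.1, c1.2]
                have hcl : clearedBy g0 i (j + 1) i j = true := by
                  unfold clearedBy
                  rw [hB, hlt_succ]
                  simp
                rw [hcl, if_pos rfl]
              · -- any other cell: untouched, and its clearedBy value is unchanged
                rw [show f1 p q = f0 p q from by simp only [hf1def]; rw [if_neg c1]]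
                have hcb : clearedBy g0 i (j + 1) p q = clearedBy g0 i j p q := by
                  unfold clearedBy
                  rw [lt2_succ_ne (show ¬(p = i ∧ q = j) from c1),
                      lt2_succ_ne (show ¬(p = i ∧ q - 1 = j) from by
                        intro hc; exact c3 ⟨hc.1, by omega⟩),
                      lt2_succ_ne (show ¬(p = i ∧ q + 1 = j) from by
                        intro hc; exact c2' ⟨by omega, hc.1, by omega⟩),
                      lt2_succ_ne (show ¬(p - 1 = i ∧ q = j) from by
                        intro hc
                        rcases Nat.eq_zero_or_pos p with hp0 | hp1
                        · exact c1 ⟨by omega, hc.2⟩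
                        · exact c5 ⟨by omega, hc.2⟩),
                      lt2_succ_ne (show ¬(p + 1 = i ∧ q = j) from by
                        intro hc; exact c4 ⟨by omega, by omega, hc.2⟩)]
                simp only [hf0]
                rw [hcb]

-- end of a row: processed-prefix (i, row-length) is the same set of cells as (i+1, 0)
lemma inv_row_end {g0 h : List (List Char)} {i : Nat}
    (hInv : InvA g0 h i ((g0.getD i []).length)) : InvA g0 h (i + 1) 0 := by
  obtain ⟨hL, hf⟩ := hInv
  refine ⟨hL, fun p q hp hq => ?_⟩
  have key : ∀ a b : Nat, (bAt g0 a b && lt2 a b i ((g0.getD i []).length)) =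
      (bAt g0 a b && lt2 a b (i + 1) 0) := by
    intro a b
    refine pair_row_end g0 a b i _ (fun hB ha => ?_)
    subst ha
    exact (bAt_lt hB).2
  have hcb : clearedBy g0 i ((g0.getD i []).length) p q = clearedBy g0 (i + 1) 0 p q := by
    unfold clearedBy
    rw [key p q, key p (q - 1), key p (q + 1), key (p - 1) q, key (p + 1) q]
  show (h.getD p []).getD q ' ' =
    if clearedBy g0 (i + 1) 0 p q then '.' else (g0.getD p []).getD q ' '
  rw [← hcb]
  exact hf p q hp hq

lemma foldCols {g0 : List (List Char)} (hp : PreL g0) {i : Nat} (hi : i < g0.length) :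
    ∀ (len k : Nat) (h : List (List Char)), k + len = (g0.getD i []).length →
      InvA g0 h i k →
      ∃ h', (List.range' k len).foldlM (fun hh col => pvCellA hh i col) h = some h' ∧
        InvA g0 h' i ((g0.getD i []).length) := by
  intro len
  induction len with
  | zero =>
    intro k h hk hInv
    exact ⟨h, rfl, by rwa [show (g0.getD i []).length = k from by omega]⟩
  | succ m ih =>
    intro k h hk hInv
    rw [List.range'_succ]
    obtain ⟨h1, e1, hInv1⟩ := cell_step hp hi (by omega) hInv
    obtain ⟨h', e', hInv'⟩ := ih (k + 1) h1 (by omega) hInv1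
    refine ⟨h', ?_, hInv'⟩
    rw [List.foldlM_cons, e1]
    exact e'

lemma row_step {g0 h : List (List Char)} (hp : PreL g0) {i : Nat}
    (hi : i < g0.length) (hInv : InvA g0 h i 0) :
    ∃ h', pvRowA h i = some h' ∧ InvA g0 h' (i + 1) 0 := by
  have hlen : (h.getD i []).length = (g0.getD i []).length := hInv.1.2 i
  obtain ⟨h', e', hInv'⟩ := foldCols hp hi ((g0.getD i []).length) 0 h (by omega) hInv
  refine ⟨h', ?_, inv_row_end hInv'⟩
  unfold pvRowA
  rw [hlen, List.range_eq_range']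
  exact e'

lemma foldRows {g0 : List (List Char)} (hp : PreL g0) :
    ∀ (len k : Nat) (h : List (List Char)), k + len = g0.length →
      InvA g0 h k 0 →
      ∃ h', (List.range' k len).foldlM pvRowA h = some h' ∧ InvA g0 h' g0.length 0 := by
  intro len
  induction len with
  | zero =>
    intro k h hk hInv
    exact ⟨h, rfl, by rwa [show g0.length = k from by omega]⟩
  | succ m ih =>
    intro k h hk hInv
    rw [List.range'_succ]
    obtain ⟨h1, e1, hInv1⟩ := row_step hp (by omega) hInv
    obtain ⟨h', e', hInv'⟩ := ih (k + 1) h1 (by omega) hInv1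
    refine ⟨h', ?_, hInv'⟩
    rw [List.foldlM_cons, e1]
    exact e'

lemma clearedBy_final {g0 : List (List Char)} (p q : Nat) :
    clearedBy g0 g0.length 0 p q = boomB g0 p q := by
  have key : ∀ a b : Nat, (bAt g0 a b && lt2 a b g0.length 0) = bAt g0 a b :=
    fun a b => pair_all g0 a b g0.length (fun hB => (bAt_lt hB).1)
  unfold clearedBy boomB
  rw [key p q, key p (q - 1), key p (q + 1), key (p - 1) q, key (p + 1) q]
  cases hB : bAt g0 p q <;> simp

lemma inv_init (g0 : List (List Char)) : InvA g0 g0 0 0 := by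
  refine ⟨⟨rfl, fun p => rfl⟩, fun p q hp hq => ?_⟩
  have hz : ∀ a b : Nat, lt2 a b 0 0 = false := by intro a b; unfold lt2; simp
  have hcb : clearedBy g0 0 0 p q = false := by
    unfold clearedBy
    rw [hz p q, hz p (q - 1), hz p (q + 1), hz (p - 1) q, hz (p + 1) q]
    simp
  show (g0.getD p []).getD q ' ' =
    if clearedBy g0 0 0 p q then '.' else (g0.getD p []).getD q ' '
  rw [hcb]
  simp

-- master characterisation of A's sweep
lemma gridA_spec {g0 : List (List Char)} (hp : PreL g0) :
    ∃ G, pvGridA g0 = some G ∧ G.length = g0.length ∧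
      (∀ p, (G.getD p []).length = (g0.getD p []).length) ∧
      (∀ p q, p < g0.length → q < (g0.getD p []).length →
        (G.getD p []).getD q ' ' =
          if boomB g0 p q then '.' else (g0.getD p []).getD q ' ') := by
  obtain ⟨G, eG, hL, hf⟩ := foldRows hp g0.length 0 g0 (by omega) (inv_init g0)
  refine ⟨G, ?_, hL.1, hL.2, fun p q hp' hq' => ?_⟩
  · unfold pvGridA
    rw [List.range_eq_range']
    exact eG
  · rw [show (G.getD p []).getD q ' ' =
      if clearedBy g0 g0.length 0 p q then '.' else (g0.getD p []).getD q ' '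
      from hf p q hp' hq', clearedBy_final p q]

-- === B-side bridge ===
lemma bombAt_natCast (g : List (List Char)) (p q : Nat) :
    pvBombAt g (p : Int) (q : Int) = bAt g p q := by
  unfold pvBombAt
  cases hB : bAt g p q with
  | true =>
    obtain ⟨h1, h2⟩ := bAt_lt hB
    unfold bAt at hB
    simp only [Int.toNat_natCast]
    rw [hB]
    simp only [Bool.and_true]
    rw [decide_eq_true (by positivity : (0:Int) ≤ (p:Int)),
        decide_eq_true (by exact_mod_cast h1),
        decide_eq_true (by positivity : (0:Int) ≤ (q:Int)),
        decide_eq_true (by exact_mod_cast h2)]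
    rfl
  | false =>
    simp only [Int.toNat_natCast]
    unfold bAt at hB
    rw [hB]
    simp

lemma bombAt_left (g : List (List Char)) (p q : Nat) :
    pvBombAt g (p : Int) ((q : Int) - 1) = (decide (1 ≤ q) && bAt g p (q - 1)) := by
  by_cases hq : 1 ≤ q
  · rw [show ((q : Int) - 1) = (((q - 1 : Nat) : Nat) : Int) from by omega, bombAt_natCast]
    simp [hq]
  · have hq0 : q = 0 := by omega
    subst hq0
    unfold pvBombAt
    simp

lemma bombAt_up (g : List (List Char)) (p q : Nat) :
    pvBombAt g ((p : Int) - 1) (q : Int) = (decide (1 ≤ p) && bAt g (p - 1) q) := by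
  by_cases hp : 1 ≤ p
  · rw [show ((p : Int) - 1) = (((p - 1 : Nat) : Nat) : Int) from by omega, bombAt_natCast]
    simp [hp]
  · have hp0 : p = 0 := by omega
    subst hp0
    unfold pvBombAt
    simp

lemma bombAt_succ_col (g : List (List Char)) (p q : Nat) :
    pvBombAt g (p : Int) ((q : Int) + 1) = bAt g p (q + 1) := by
  rw [show ((q : Int) + 1) = (((q + 1 : Nat) : Nat) : Int) from by omega, bombAt_natCast]

lemma bombAt_succ_row (g : List (List Char)) (p q : Nat) :
    pvBombAt g ((p : Int) + 1) (q : Int) = bAt g (p + 1) q := by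
  rw [show ((p : Int) + 1) = (((p + 1 : Nat) : Nat) : Int) from by omega, bombAt_natCast]

-- the main equivalence
lemma main_eq (t : Int) (grid : List String)
    (hpre : Pre_bombs_planted_exactly_three_seconds_ago_will_detonate t grid) :
    bombs_planted_exactly_three_seconds_ago_will_detonate t grid =
      bombs_planted_exactly_three_seconds_ago_will_detonate_alt t grid := by
  set g0 : List (List Char) := grid.map (fun s => s.toList) with hg0
  have hPreL : PreL g0 := by
    intro p q hp hq hB
    have hp' : p < grid.length := by simpa [hg0] using hp
    have hq' : q < (grid.getD p "").toList.length := by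
      rw [hg0, getD_map_toList] at hq; exact hq
    have hB' : (grid.getD p "").toList.getD q ' ' = 'B' := by
      unfold bAt at hB
      rw [hg0, getD_map_toList, beq_iff_eq] at hB
      exact hB
    obtain ⟨c1, c2⟩ := hpre p hp' q hq' hB'
    constructor
    · intro h1
      rw [hg0, getD_map_toList]
      exact c1 h1
    · intro h2
      rw [hg0, getD_map_toList]
      exact c2 (by simpa [hg0] using h2)
  obtain ⟨G, eG, hGlen, hGrow, hGcell⟩ := gridA_spec hPreL
  show (match pvGridA g0 with
    | none => []
    | some g' => (g'.map (fun l => String.mk l)).map (fun s => PySem.Str.replace s "O" "B")) =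
    (PySem.List.enumerate g0 0).map (fun p =>
      PySem.Str.replace
        (String.mk ((PySem.List.enumerate p.2 0).map (fun q =>
          if pvBombAt g0 p.1 q.1 || pvBombAt g0 p.1 (q.1 - 1) || pvBombAt g0 p.1 (q.1 + 1)
              || pvBombAt g0 (p.1 - 1) q.1 || pvBombAt g0 (p.1 + 1) q.1
          then '.' else q.2)))
        "O" "B")
  rw [eG]
  have hg0len : g0.length = grid.length := by simp [hg0]
  apply List.ext_getElem
  · simp [hGlen, PySem.List.length_enumerate]
  · intro k hk1 hk2
    have hkG : k < G.length := by simpa using hk1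
    have hkg : k < g0.length := by rw [← hGlen]; exact hkG
    simp only [List.getElem_map]
    rw [PySem.List.getElem_enumerate]
    simp only [Int.zero_add]
    congr 1
    apply congrArg
    have hGk : G[k] = G.getD k [] := (List.getD_eq_getElem G [] hkG).symm
    have hgk : g0[k] = g0.getD k [] := (List.getD_eq_getElem g0 [] hkg).symm
    have hrowlen : G[k].length = g0[k].length := by
      rw [hGk, hgk, hGrow k]
    apply List.ext_getElem
    · simp [PySem.List.length_enumerate, hrowlen]
    · intro q hq1 hq2
      have hqrow : q < (g0.getD k []).length := by rw [← hgk, ← hrowlen]; exact hq1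
      have hcell := hGcell k q hkg hqrow
      rw [← hGk] at hcell
      rw [List.getD_eq_getElem _ _ hq1] at hcell
      rw [hcell]
      simp only [List.getElem_map]
      rw [PySem.List.getElem_enumerate]
      simp only [Int.zero_add]
      show (if boomB g0 k q then '.' else (g0.getD k []).getD q ' ') =
        (if pvBombAt g0 (k : Int) (q : Int) || pvBombAt g0 (k : Int) ((q : Int) - 1)
            || pvBombAt g0 (k : Int) ((q : Int) + 1) || pvBombAt g0 ((k : Int) - 1) (q : Int)
            || pvBombAt g0 ((k : Int) + 1) (q : Int)
         then '.' else g0[k][q])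
      rw [bombAt_natCast, bombAt_left, bombAt_succ_col, bombAt_up, bombAt_succ_row]
      rw [show (bAt g0 k q || (decide (1 ≤ q) && bAt g0 k (q - 1)) || bAt g0 k (q + 1) ||
          (decide (1 ≤ k) && bAt g0 (k - 1) q) || bAt g0 (k + 1) q) = boomB g0 k q from rfl]
      rcases hb : boomB g0 k q
      · simp only [Bool.false_eq_true, if_false]
        have hq1' : q < g0[k].length := by rw [hgk]; exact hqrow
        rw [List.getD_eq_getElem _ _ hqrow]
        exact (List.getElem_of_eq hgk hq1').symm
      · simp

-- ===== VERDICT (by name: the statement is the Claim_ definition above) =====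
theorem bombs_planted_exactly_three_seconds_ago_will_detonate_spec : Claim_equal_bombs_planted_exactly_three_seconds_ago_will_detonate := by
  intro t grid _ hpre
  unfold Spec_bombs_planted_exactly_three_seconds_ago_will_detonate
  exact main_eq t grid hpre
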